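-- pv_equiv track=rewrite | github.com/lwerdna/finter | finter/elf.py | sh_flags_tostr
-- ===== SOURCE A (Python) =====
-- SHF_WRITE = (1 << 0)
--
-- SHF_ALLOC = (1 << 1)
--
-- SHF_EXECINSTR = (1 << 2)
--
-- SHF_MERGE = (1 << 4)
--
-- SHF_STRINGS = (1 << 5)
--
-- SHF_INFO_LINK = (1 << 6)
--
-- SHF_LINK_ORDER = (1 << 7)
--
-- SHF_OS_NONCONFORMING = (1 << 8)
--
-- SHF_GROUP = (1 << 9)
--
-- SHF_TLS = (1 << 10)
--
-- def sh_flags_tostr(a):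
--     lookup = {
--         SHF_WRITE:'WRITE', SHF_ALLOC:'ALLOC', SHF_EXECINSTR:'EXECINSTR',
--         SHF_MERGE:'MERGE', SHF_STRINGS:'STRINGS', SHF_INFO_LINK:'INFO_LINK',
--         SHF_LINK_ORDER:'LINK_ORDER', SHF_OS_NONCONFORMING:'OS_NONCONFORMING',
--         SHF_GROUP:'GROUP', SHF_TLS:'TLS'
--     }
--     result = []
--     for bit in lookup.keys():
--         if a & bit:
--             result.append(lookup[bit])
--     if not result:
--         if a==0:
--             result = ['0']
--         else:
--             result = 'UNKNOWN'
--     return '|'.join(result)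
-- ===== SOURCE B (Python) =====
-- # B: extract the set bits of the masked flag word low-to-high instead of scanning the fixed table.
-- _NAMES = {
--     1: 'WRITE', 2: 'ALLOC', 4: 'EXECINSTR', 16: 'MERGE', 32: 'STRINGS',
--     64: 'INFO_LINK', 128: 'LINK_ORDER', 256: 'OS_NONCONFORMING',
--     512: 'GROUP', 1024: 'TLS',
-- }
--
-- def sh_flags_tostr(a):
--     t = a & 0x7FF
--     parts = []
--     while t:
--         lb = t & -t          # lowest set bit
--         t ^= lb
--         if lb in _NAMES:
--             parts.append(_NAMES[lb])
--     if parts: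
--         return '|'.join(parts)
--     return '0' if a == 0 else 'UNKNOWN'
-- ===== Notes on version B (the rewrite author's own statement) =====
-- stated objective: alternative
-- what changed: B repeatedly extracts the lowest set bit of the masked flag word (t & -t) and names each known bit, instead of scanning the fixed flag table and testing every table bit against the input.
-- intended difference: On nonzero inputs with no named flag bit set (a != 0 and a & 2039 == 0), A accidentally assigns the bare string 'UNKNOWN' to its list variable and returns it joined character-by-character as 'U|N|K|N|O|W|N'; B returns 'UNKNOWN', the value the code evidently intended. — e.g. on sh_flags_tostr(8): A returns "U|N|K|N|O|W|N", B returns "UNKNOWN"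
import Mathlib
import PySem

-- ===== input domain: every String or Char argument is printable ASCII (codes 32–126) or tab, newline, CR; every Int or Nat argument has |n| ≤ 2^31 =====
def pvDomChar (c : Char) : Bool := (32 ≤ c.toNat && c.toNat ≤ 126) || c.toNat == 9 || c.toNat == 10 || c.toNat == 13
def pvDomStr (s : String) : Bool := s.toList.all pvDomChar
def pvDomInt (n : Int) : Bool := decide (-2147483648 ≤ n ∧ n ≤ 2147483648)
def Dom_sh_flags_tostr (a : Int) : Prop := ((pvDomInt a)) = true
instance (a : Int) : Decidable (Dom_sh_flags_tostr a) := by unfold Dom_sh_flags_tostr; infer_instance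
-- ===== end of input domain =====

-- B extracts the set bits of the masked flag word low-to-high instead of scanning the fixed
-- flag table (objective: alternative decomposition, same cost); on nonzero inputs with no
-- named flag bit, B returns "UNKNOWN" where A returns it joined character-by-character (D_ below).

-- ===== PORT A =====
def sh_flags_tostr (a : Int) : String :=
  let lookup : List (Int × String) :=
    [(1, "WRITE"), (2, "ALLOC"), (4, "EXECINSTR"), (16, "MERGE"), (32, "STRINGS"),
     (64, "INFO_LINK"), (128, "LINK_ORDER"), (256, "OS_NONCONFORMING"), (512, "GROUP"),
     (1024, "TLS")]
  let result := lookup.foldl (fun r p => if PySem.Int.band a p.1 ≠ 0 then r ++ [p.2] else r) []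
  let result := if result = [] then
      (if a = 0 then ["0"]
       else "UNKNOWN".toList.map (fun c => String.ofList [c]))  -- '|'.join('UNKNOWN') joins the characters
    else result
  PySem.Str.join "|" result

-- ===== PORT B =====
def pvNames : PySem.Dict Nat String :=
  PySem.Dict.ofList
    [(1, "WRITE"), (2, "ALLOC"), (4, "EXECINSTR"), (16, "MERGE"), (32, "STRINGS"),
     (64, "INFO_LINK"), (128, "LINK_ORDER"), (256, "OS_NONCONFORMING"), (512, "GROUP"),
     (1024, "TLS")]

-- the while loop of Source B; fuel 11 is a pure totality guard: t = a & 0x7FF has at most 11 set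
-- bits and each iteration clears one, so the fuel is never exhausted before t = 0.
-- Source B's 'lb = t & -t' (lowest set bit) is written on Nat as t &&& (t ^^^ (t - 1)),
-- which is the same value for every t > 0.
def pvExtract : Nat → Nat → List String → List String
  | 0, _, parts => parts
  | fuel + 1, t, parts =>
    if t = 0 then parts
    else
      let lb := t &&& (t ^^^ (t - 1))
      pvExtract fuel (t ^^^ lb)
        (match pvNames.get? lb with
         | some n => parts ++ [n]
         | none => parts)

def sh_flags_tostr_alt (a : Int) : String :=
  let t := (PySem.Int.band a 2047).toNat
  let parts := pvExtract 11 t []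
  if parts ≠ [] then PySem.Str.join "|" parts
  else if a = 0 then "0"
  else "UNKNOWN"

-- ===== PRECONDITION & SPEC =====
-- On nonzero inputs where none of the ten named flag bits is set, A accidentally assigns the
-- bare string 'UNKNOWN' to its list variable and returns it joined character-by-character
-- ("U|N|K|N|O|W|N"); B returns "UNKNOWN", the value the code evidently intended.
def D_sh_flags_tostr (a : Int) : Prop := a ≠ 0 ∧ PySem.Int.band a 2039 = 0
instance (a : Int) : Decidable (D_sh_flags_tostr a) := by unfold D_sh_flags_tostr; infer_instance

def Spec_sh_flags_tostr (a : Int) (out : String) : Prop :=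
  ¬ D_sh_flags_tostr a → out = sh_flags_tostr_alt a
instance (a : Int) (out : String) : Decidable (Spec_sh_flags_tostr a out) := by unfold Spec_sh_flags_tostr; infer_instance

def pvDiffWitness_sh_flags_tostr : Int := (8)
def pvDiffWitnessOut_sh_flags_tostr : String × String := ("U|N|K|N|O|W|N", "UNKNOWN")

-- ===== CLAIM (what is proved, stated in full; the proofs are below) =====
def Claim_unchanged_sh_flags_tostr : Prop := ∀ (a : Int), Dom_sh_flags_tostr a → Spec_sh_flags_tostr a (sh_flags_tostr a)
def Claim_changed_sh_flags_tostr : Prop := Dom_sh_flags_tostr (pvDiffWitness_sh_flags_tostr) ∧ D_sh_flags_tostr (pvDiffWitness_sh_flags_tostr) ∧ sh_flags_tostr (pvDiffWitness_sh_flags_tostr) = pvDiffWitnessOut_sh_flags_tostr.1 ∧ sh_flags_tostr_alt (pvDiffWitness_sh_flags_tostr) = pvDiffWitnessOut_sh_flags_tostr.2 ∧ pvDiffWitnessOut_sh_flags_tostr.1 ≠ pvDiffWitnessOut_sh_flags_tostr.2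
def Claim_exact_sh_flags_tostr : Prop := ∀ (a : Int), Dom_sh_flags_tostr a → D_sh_flags_tostr a → sh_flags_tostr a ≠ sh_flags_tostr_alt a

-- ===== LEMMAS AND PROOFS =====

-- only the low 11 bits of x matter when AND-ing with b < 2048
lemma pv_land_mod (x b : Nat) (hb : b < 2048) : x &&& b = (x % 2048) &&& b := by
  apply Nat.eq_of_testBit_eq
  intro i
  have h2048 : (2048 : Nat) = 2 ^ 11 := by norm_num
  by_cases hi : i < 11
  · rw [h2048, Nat.testBit_land, Nat.testBit_land, Nat.testBit_mod_two_pow]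
    simp [hi]
  · have hbf : Nat.testBit b i = false :=
      Nat.testBit_lt_two_pow (lt_of_lt_of_le (h2048 ▸ hb) (Nat.pow_le_pow_right (by norm_num) (by omega)))
    simp [hbf]

lemma pv_mask_id (b : Nat) (hb : b < 2048) : 2047 &&& b = b := by
  apply Nat.eq_of_testBit_eq
  intro i
  have h2048 : (2048 : Nat) = 2 ^ 11 := by norm_num
  by_cases hi : i < 11
  · rw [Nat.testBit_land, (by norm_num : (2047 : Nat) = 2 ^ 11 - 1), Nat.testBit_two_pow_sub_one]
    simp [hi]
  · have hbf : Nat.testBit b i = false :=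
      Nat.testBit_lt_two_pow (lt_of_lt_of_le (h2048 ▸ hb) (Nat.pow_le_pow_right (by norm_num) (by omega)))
    simp [hbf]

-- the ten flag bits, and their union 2039
def pvBits : List Nat := [1, 2, 4, 16, 32, 64, 128, 256, 512, 1024, 2039]

-- negative-argument case of Python &, checked on every 11-bit pattern
set_option maxRecDepth 8192 in
lemma pv_neg_case : ∀ m : Fin 2048, ∀ b ∈ pvBits,
    b - (m.val &&& b) = (2047 - (m.val &&& 2047)) &&& b := by decide

-- a & b = (a & 0x7FF) & b for each mask b of pvBits, for every Int a (incl. negatives)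
lemma pv_band_low (a : Int) (b : Nat) (hbm : b ∈ pvBits) :
    PySem.Int.band a (b : Int) = (((PySem.Int.band a 2047).toNat &&& b : Nat) : Int) := by
  have hb : b < 2048 := by
    have h := hbm; simp only [pvBits, List.mem_cons, List.not_mem_nil, or_false] at h
    rcases h with rfl|rfl|rfl|rfl|rfl|rfl|rfl|rfl|rfl|rfl|rfl <;> norm_num
  have hbn : (0 : Int) ≤ (b : Int) := by positivity
  have h2047 : (2047 : Int).toNat = 2047 := rfl
  by_cases ha : 0 ≤ a
  · simp only [PySem.Int.band, if_pos ha, if_pos hbn, if_pos (by norm_num : (0:Int) ≤ 2047),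
      Int.toNat_natCast, h2047]
    rw [Nat.land_assoc, pv_mask_id b hb]
  · simp only [PySem.Int.band, if_neg ha, if_pos hbn, if_pos (by norm_num : (0:Int) ≤ 2047),
      Int.toNat_natCast, h2047]
    rw [Nat.land_comm b, Nat.land_comm 2047,
        pv_land_mod (-a - 1).toNat b hb, pv_land_mod (-a - 1).toNat 2047 (by norm_num)]
    exact_mod_cast pv_neg_case ⟨(-a - 1).toNat % 2048, Nat.mod_lt _ (by norm_num)⟩ b hbm

-- the table scan, on the masked word
def pvTable : List (Nat × String) :=
  [(1, "WRITE"), (2, "ALLOC"), (4, "EXECINSTR"), (16, "MERGE"), (32, "STRINGS"),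
   (64, "INFO_LINK"), (128, "LINK_ORDER"), (256, "OS_NONCONFORMING"), (512, "GROUP"),
   (1024, "TLS")]

def pvParts (n : Nat) : List String :=
  pvTable.foldl (fun r p => if n &&& p.1 ≠ 0 then r ++ [p.2] else r) []

lemma pv_n_lt (a : Int) : (PySem.Int.band a 2047).toNat < 2048 := by
  have h2047 : (2047 : Int).toNat = 2047 := rfl
  by_cases ha : 0 ≤ a
  · simp only [PySem.Int.band, if_pos ha, if_pos (by norm_num : (0:Int) ≤ 2047),
      Int.toNat_natCast, h2047]
    have := Nat.and_le_right (n := a.toNat) (m := 2047); omega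
  · simp only [PySem.Int.band, if_neg ha, if_pos (by norm_num : (0:Int) ≤ 2047),
      Int.toNat_natCast, h2047]
    omega

-- the bit-extraction loop computes exactly the table scan, for every 11-bit word
set_option maxRecDepth 8192 in
lemma pv_core_fin : ∀ n : Fin 2048, pvExtract 11 n.val [] = pvParts n.val := by decide

-- the table scan is empty exactly when no named flag bit is set
set_option maxRecDepth 8192 in
lemma pv_empty_fin : ∀ n : Fin 2048, (pvParts n.val = []) ↔ (n.val &&& 2039 = 0) := by decide

-- A's foldl over the Int table equals the Nat table scan of the masked word
lemma pv_foldl (a : Int) :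
    ([(1, "WRITE"), (2, "ALLOC"), (4, "EXECINSTR"), (16, "MERGE"), (32, "STRINGS"),
      (64, "INFO_LINK"), (128, "LINK_ORDER"), (256, "OS_NONCONFORMING"), (512, "GROUP"),
      (1024, "TLS")] : List (Int × String)).foldl
        (fun r p => if PySem.Int.band a p.1 ≠ 0 then r ++ [p.2] else r) []
      = pvParts (PySem.Int.band a 2047).toNat := by
  have h1 : PySem.Int.band a 1 = (((PySem.Int.band a 2047).toNat &&& 1 : Nat) : Int) := by
    exact_mod_cast pv_band_low a 1 (by decide)
  have h2 : PySem.Int.band a 2 = (((PySem.Int.band a 2047).toNat &&& 2 : Nat) : Int) := by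
    exact_mod_cast pv_band_low a 2 (by decide)
  have h4 : PySem.Int.band a 4 = (((PySem.Int.band a 2047).toNat &&& 4 : Nat) : Int) := by
    exact_mod_cast pv_band_low a 4 (by decide)
  have h16 : PySem.Int.band a 16 = (((PySem.Int.band a 2047).toNat &&& 16 : Nat) : Int) := by
    exact_mod_cast pv_band_low a 16 (by decide)
  have h32 : PySem.Int.band a 32 = (((PySem.Int.band a 2047).toNat &&& 32 : Nat) : Int) := by
    exact_mod_cast pv_band_low a 32 (by decide)
  have h64 : PySem.Int.band a 64 = (((PySem.Int.band a 2047).toNat &&& 64 : Nat) : Int) := by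
    exact_mod_cast pv_band_low a 64 (by decide)
  have h128 : PySem.Int.band a 128 = (((PySem.Int.band a 2047).toNat &&& 128 : Nat) : Int) := by
    exact_mod_cast pv_band_low a 128 (by decide)
  have h256 : PySem.Int.band a 256 = (((PySem.Int.band a 2047).toNat &&& 256 : Nat) : Int) := by
    exact_mod_cast pv_band_low a 256 (by decide)
  have h512 : PySem.Int.band a 512 = (((PySem.Int.band a 2047).toNat &&& 512 : Nat) : Int) := by
    exact_mod_cast pv_band_low a 512 (by decide)
  have h1024 : PySem.Int.band a 1024 = (((PySem.Int.band a 2047).toNat &&& 1024 : Nat) : Int) := by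
    exact_mod_cast pv_band_low a 1024 (by decide)
  simp only [pvParts, pvTable, List.foldl_cons, List.foldl_nil,
    h1, h2, h4, h16, h32, h64, h128, h256, h512, h1024, ne_eq, Nat.cast_eq_zero]

-- D_'s mask test agrees with the masked word's mask test
lemma pv_band2039 (a : Int) :
    PySem.Int.band a 2039 = 0 ↔ (PySem.Int.band a 2047).toNat &&& 2039 = 0 := by
  rw [show (2039 : Int) = ((2039 : Nat) : Int) from rfl, pv_band_low a 2039 (by decide)]
  exact Int.natCast_eq_zero

-- both ports reduce to a common form on the masked word
lemma pv_common (a : Int) :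
    sh_flags_tostr a =
      (let n := (PySem.Int.band a 2047).toNat
       PySem.Str.join "|"
         (if pvParts n = [] then
            (if a = 0 then ["0"] else "UNKNOWN".toList.map (fun c => String.ofList [c]))
          else pvParts n)) := by
  simp only [sh_flags_tostr, pv_foldl a]

lemma pv_alt_common (a : Int) :
    sh_flags_tostr_alt a =
      (let n := (PySem.Int.band a 2047).toNat
       if pvParts n ≠ [] then PySem.Str.join "|" (pvParts n)
       else if a = 0 then "0"
       else "UNKNOWN") := by
  simp only [sh_flags_tostr_alt]
  rw [pv_core_fin ⟨_, pv_n_lt a⟩]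

-- ===== VERDICT (by name: the statement is the Claim_ definition above) =====
theorem sh_flags_tostr_spec : Claim_unchanged_sh_flags_tostr := by
  intro a _ hD
  rw [pv_common a, pv_alt_common a]
  simp only
  by_cases hE : pvParts (PySem.Int.band a 2047).toNat = []
  · have h2039 : PySem.Int.band a 2039 = 0 :=
      (pv_band2039 a).mpr ((pv_empty_fin ⟨_, pv_n_lt a⟩).mp hE)
    have h0 : a = 0 := by
      by_contra h
      exact hD ⟨h, h2039⟩
    simp only [h0, ne_eq, if_true]
    decide
  · simp [hE]

theorem sh_flags_tostr_changed : Claim_changed_sh_flags_tostr := by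
  unfold Claim_changed_sh_flags_tostr; decide

theorem sh_flags_tostr_tight : Claim_exact_sh_flags_tostr := by
  intro a _ hD
  rcases hD with ⟨h0, h2039⟩
  have hE : pvParts (PySem.Int.band a 2047).toNat = [] :=
    (pv_empty_fin ⟨_, pv_n_lt a⟩).mpr ((pv_band2039 a).mp h2039)
  rw [pv_common a, pv_alt_common a]
  simp only [hE, h0, ne_eq, not_true_eq_false, if_false]
  decide
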